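-- pv_equiv track=rewrite | github.com/danieldjohnson/gated-graph-transformer-network | task_generators/ngram_next.py | ngram_next_map
-- ===== SOURCE A (Python) =====
-- def all_ngrams(seq, ngram_size):
--     for i in range(len(seq)+1-ngram_size):
--         yield tuple(seq[i:i+ngram_size])
--
-- def ngram_next_map(seq, ngram_size):
--     the_map = {}
--     for ngram in all_ngrams(seq, ngram_size+1):
--         key = ngram[:-1]
--         val = ngram[-1]
--         if key in the_map and the_map[key] != val:
--             # Don't want keys that appear twice
--             the_map[key] = None
--         else:
--             the_map[key] = val
--     return {k:v for k,v in the_map.items() if v is not None}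
-- ===== SOURCE B (Python) =====
-- def ngram_next_map(seq, ngram_size):
--     # Two-phase: group every prefix with ALL its successors, then keep only
--     # the prefixes whose successor list is homogeneous.
--     groups = {}
--     for i in range(len(seq) - ngram_size):
--         groups.setdefault(tuple(seq[i:i + ngram_size]), []).append(seq[i + ngram_size])
--     return {k: vs[0] for k, vs in groups.items() if all(v == vs[0] for v in vs)}
-- ===== Notes on version B (the rewrite author's own statement) =====
-- stated objective: alternative
-- what changed: A detects ambiguous prefixes online with a None-sentinel overwrite inside the scan (building each (ngram_size+1)-tuple, re-slicing it for the key, and doing up to three dict operations per position); B first groups every prefix with the list of all its successors in one pass (one slice and one setdefault per position) and then, in a separate comprehension, keeps only the prefixes whose successor list is homogeneous.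
import Mathlib
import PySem

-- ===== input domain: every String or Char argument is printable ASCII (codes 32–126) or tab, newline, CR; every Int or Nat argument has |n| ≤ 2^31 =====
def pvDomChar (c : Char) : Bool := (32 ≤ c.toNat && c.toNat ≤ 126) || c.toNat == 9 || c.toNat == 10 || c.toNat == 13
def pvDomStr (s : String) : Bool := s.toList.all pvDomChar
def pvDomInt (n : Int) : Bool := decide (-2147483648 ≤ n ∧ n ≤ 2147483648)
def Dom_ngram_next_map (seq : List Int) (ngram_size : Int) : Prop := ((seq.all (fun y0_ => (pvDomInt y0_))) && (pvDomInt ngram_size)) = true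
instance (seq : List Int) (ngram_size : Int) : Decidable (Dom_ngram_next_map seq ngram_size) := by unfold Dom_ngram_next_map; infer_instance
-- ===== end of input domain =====

-- B replaces A's online sentinel-overwrite ambiguity detection by a two-phase scheme: first group
-- every prefix with the list of ALL its successors, then keep the prefixes whose list is homogeneous.

-- ===== PORT A =====
-- all_ngrams is a generator; its i-th element is tuple(seq[i:i+n]) for i in range(len(seq)+1-n),
-- inlined into the loop below with n = ngram_size+1.
-- ngram = seq[i:i+(ngram_size+1)]; key = ngram[:-1]; val = ngram[-1]
def ngramA_key (seq : List Int) (ngram_size : Int) (i : Int) : List Int :=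
  PySem.List.slice (PySem.List.slice seq (some i) (some (i + (ngram_size + 1)))) none (some (-1))

def ngramA_step (seq : List Int) (ngram_size : Int) (d : PySem.Dict (List Int) (Option Int))
    (i : Int) : PySem.Dict (List Int) (Option Int) :=
  match PySem.List.pyGet? (PySem.List.slice seq (some i) (some (i + (ngram_size + 1)))) (-1) with
  | none => d                                  -- ngram[-1] raised IndexError (outside Pre_)
  | some val =>
      match d.get? (ngramA_key seq ngram_size i) with
      | some old =>
          if old ≠ some val then d.insert (ngramA_key seq ngram_size i) none
          else d.insert (ngramA_key seq ngram_size i) (some val)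
      | none => d.insert (ngramA_key seq ngram_size i) (some val)

def ngram_next_map (seq : List Int) (ngram_size : Int) : List (List Int × Int) :=
  let the_map := (PySem.List.pyRange 0 ((seq.length : Int) + 1 - (ngram_size + 1)) 1).foldl
      (ngramA_step seq ngram_size) PySem.Dict.empty
  the_map.items.filterMap (fun p => match p.2 with
    | some v => some (p.1, v)
    | none => none)

-- ===== PORT B =====
def ngramB_step (seq : List Int) (ngram_size : Int) (g : PySem.Dict (List Int) (List Int))
    (i : Int) : PySem.Dict (List Int) (List Int) :=
  match PySem.List.pyGet? seq (i + ngram_size) with   -- seq[i+ngram_size]; none = IndexError (outside Pre_)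
  | none => g
  | some v => g.modify (PySem.List.slice seq (some i) (some (i + ngram_size))) [] (· ++ [v])
      -- groups.setdefault(tuple(seq[i:i+ngram_size]), []).append(v)

def ngram_next_map_alt (seq : List Int) (ngram_size : Int) : List (List Int × Int) :=
  let groups := (PySem.List.pyRange 0 ((seq.length : Int) - ngram_size) 1).foldl
      (ngramB_step seq ngram_size) PySem.Dict.empty
  groups.items.filterMap (fun p => match p.2 with
    | v0 :: vs => if (v0 :: vs).all (· == v0) then some (p.1, v0) else none
    | [] => none)   -- unreachable: every group list is nonempty (Python's vs[0])

-- ===== PRECONDITION & SPEC =====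
-- Pre_ excludes ngram_size < 0, on which A always raises IndexError (ngram[-1] of an empty slice).
def Pre_ngram_next_map (seq : List Int) (ngram_size : Int) : Prop := 0 ≤ ngram_size
instance (seq : List Int) (ngram_size : Int) : Decidable (Pre_ngram_next_map seq ngram_size) := by
  unfold Pre_ngram_next_map; infer_instance
def pvWitness_ngram_next_map : List Int × Int := ([1, 2, 1, 3, 1, 2], 1)

def Spec_ngram_next_map (seq : List Int) (ngram_size : Int) (out : List (List Int × Int)) : Prop := out = ngram_next_map_alt seq ngram_size
instance (seq : List Int) (ngram_size : Int) (out : List (List Int × Int)) : Decidable (Spec_ngram_next_map seq ngram_size out) := by unfold Spec_ngram_next_map; infer_instance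

-- ===== CLAIM (what is proved, stated in full; the proofs are below) =====
def Claim_equal_ngram_next_map : Prop := ∀ (seq : List Int) (ngram_size : Int), Dom_ngram_next_map seq ngram_size → Pre_ngram_next_map seq ngram_size → Spec_ngram_next_map seq ngram_size (ngram_next_map seq ngram_size)

-- ===== LEMMAS AND PROOFS =====

-- A's stored value for a prefix is `some v` iff all successors seen so far equal v.
def pvCollapse (l : List Int) : Option Int :=
  match l with
  | [] => none
  | v :: vs => if vs.all (· == v) then some v else none

def pvMapD (d : PySem.Dict (List Int) (List Int)) : PySem.Dict (List Int) (Option Int) :=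
  PySem.Dict.mk (d.items.map (fun p => (p.1, pvCollapse p.2)))

lemma get?_pvMapD (d : PySem.Dict (List Int) (List Int)) (k : List Int) :
    (pvMapD d).get? k = (d.get? k).map pvCollapse := by
  obtain ⟨l⟩ := d
  induction l with
  | nil => simp [pvMapD, PySem.Dict.get?]
  | cons p rest ih =>
      obtain ⟨k0, g0⟩ := p
      simp only [pvMapD, List.map_cons, PySem.Dict.get?_mk_cons] at *
      by_cases h : (k0 == k) = true <;> simp [h, ih]

lemma pvCollapse_snoc (g0 : Int) (gs : List Int) (v : Int) :
    pvCollapse (g0 :: gs ++ [v]) =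
      if pvCollapse (g0 :: gs) = some v then some v else none := by
  simp only [pvCollapse]
  by_cases h : gs.all (· == g0) = true <;> by_cases hv : v = g0 <;> simp_all
  exact fun _ e => hv e.symm

lemma take_succ_dropLast (l : List Int) (n : Nat) (h : n + 1 ≤ l.length) :
    (l.take (n+1)).dropLast = l.take n := by
  rw [List.dropLast_eq_take]; simp [List.take_take, List.length_take]; omega

lemma take_succ_getLast? (l : List Int) (n : Nat) (h : n < l.length) :
    (l.take (n+1)).getLast? = some l[n] := by
  rw [List.getLast?_eq_getElem?]
  simp [List.length_take]
  rw [Nat.min_eq_left (by omega : n+1 ≤ l.length)]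
  simp [h]

lemma contains_pvMapD (d : PySem.Dict (List Int) (List Int)) (k : List Int) :
    (pvMapD d).contains k = d.contains k := by
  rw [PySem.Dict.contains_eq_isSome_get?, PySem.Dict.contains_eq_isSome_get?, get?_pvMapD]
  cases d.get? k <;> rfl

lemma pvMapD_insert (d : PySem.Dict (List Int) (List Int)) (k : List Int) (L : List Int) :
    pvMapD (d.insert k L) = (pvMapD d).insert k (pvCollapse L) := by
  apply PySem.Dict.ext
  by_cases h : d.contains k = true
  · rw [show pvMapD (d.insert k L) = PySem.Dict.mk ((d.insert k L).items.map
        (fun p => (p.1, pvCollapse p.2))) from rfl]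
    rw [PySem.Dict.items_insert_of_contains _ _ h,
        PySem.Dict.items_insert_of_contains _ _ (by rw [contains_pvMapD]; exact h)]
    simp only [pvMapD, List.map_map]
    apply List.map_congr_left
    intro p _
    by_cases hk : (p.1 == k) = true <;> simp [hk, Function.comp]
  · rw [show pvMapD (d.insert k L) = PySem.Dict.mk ((d.insert k L).items.map
        (fun p => (p.1, pvCollapse p.2))) from rfl]
    rw [PySem.Dict.items_insert_of_not_contains _ _ (by simp [h] at *),
        PySem.Dict.items_insert_of_not_contains _ _ (by rw [contains_pvMapD]; simp [h] at *)]
    simp [pvMapD]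

lemma step_comm (seq : List Int) (ns i : Int) (hi : 0 ≤ i) (hns : 0 ≤ ns)
    (hin : i + ns < (seq.length : Int)) (dB : PySem.Dict (List Int) (List Int))
    (hne : ∀ p ∈ dB.items, p.2 ≠ []) :
    ngramA_step seq ns (pvMapD dB) i = pvMapD (ngramB_step seq ns dB i) := by
  have hng : PySem.List.slice seq (some i) (some (i + (ns + 1)))
      = (seq.drop i.toNat).take (ns.toNat + 1) := by
    rw [PySem.List.slice_toNat seq hi (by omega)]
    congr 1; omega
  have hkB : PySem.List.slice seq (some i) (some (i + ns))
      = (seq.drop i.toNat).take ns.toNat := by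
    rw [PySem.List.slice_toNat seq hi (by omega)]
    congr 1; omega
  have hdl : ns.toNat < (seq.drop i.toNat).length := by
    simp [List.length_drop]; omega
  have hvA : PySem.List.pyGet? (PySem.List.slice seq (some i) (some (i + (ns + 1)))) (-1)
      = some ((seq.drop i.toNat)[ns.toNat]) := by
    rw [hng, PySem.List.pyGet?_neg_one, take_succ_getLast? _ _ hdl]
  have hvB : PySem.List.pyGet? seq (i + ns) = some ((seq.drop i.toNat)[ns.toNat]) := by
    rw [PySem.List.pyGet?_eq_some_getElem seq (by omega) (by omega)]
    congr 1
    rw [List.getElem_drop]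
    congr 1; omega
  have hkA : ngramA_key seq ns i = (seq.drop i.toNat).take ns.toNat := by
    rw [ngramA_key, hng, PySem.List.slice_to_neg_one, take_succ_dropLast _ _ (by omega)]
  unfold ngramA_step ngramB_step
  rw [hvA, hvB]
  simp only [hkA, hkB]
  rw [show dB.modify ((seq.drop i.toNat).take ns.toNat) [] (· ++ [(seq.drop i.toNat)[ns.toNat]])
        = dB.insert ((seq.drop i.toNat).take ns.toNat)
            (dB.getD ((seq.drop i.toNat).take ns.toNat) [] ++ [(seq.drop i.toNat)[ns.toNat]]) from rfl]
  rw [get?_pvMapD]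
  cases hg : dB.get? ((seq.drop i.toNat).take ns.toNat) with
  | none =>
      rw [PySem.Dict.getD_of_get?_eq_none _ _ hg, pvMapD_insert]
      rfl
  | some g =>
      have hgne : g ≠ [] := hne _ (PySem.Dict.mem_items_of_get?_eq_some dB hg)
      obtain ⟨g0, gs, rfl⟩ := List.exists_cons_of_ne_nil hgne
      rw [PySem.Dict.getD_of_get?_eq_some _ _ hg, pvMapD_insert, pvCollapse_snoc]
      simp only [Option.map_some]
      split_ifs <;> simp_all

lemma step_ne (seq : List Int) (ns i : Int) (dB : PySem.Dict (List Int) (List Int))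
    (hne : ∀ p ∈ dB.items, p.2 ≠ []) :
    ∀ p ∈ (ngramB_step seq ns dB i).items, p.2 ≠ [] := by
  unfold ngramB_step
  cases h : PySem.List.pyGet? seq (i + ns) with
  | none => exact hne
  | some v =>
      intro p hp
      have hp' : p ∈ (dB.insert (PySem.List.slice seq (some i) (some (i + ns)))
          (dB.getD (PySem.List.slice seq (some i) (some (i + ns))) [] ++ [v])).items := hp
      rcases (PySem.Dict.mem_items_insert _ _ _ _).1 hp' with h1 | ⟨h2, _⟩
      · subst h1; simp
      · exact hne p h2

lemma fold_comm (seq : List Int) (ns : Int) (hns : 0 ≤ ns) (l : List Int)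
    (hl : ∀ i ∈ l, 0 ≤ i ∧ i + ns < (seq.length : Int))
    (dB : PySem.Dict (List Int) (List Int)) (hne : ∀ p ∈ dB.items, p.2 ≠ []) :
    l.foldl (ngramA_step seq ns) (pvMapD dB) = pvMapD (l.foldl (ngramB_step seq ns) dB) := by
  induction l generalizing dB with
  | nil => rfl
  | cons i rest ih =>
      obtain ⟨hi, hin⟩ := hl i (by simp)
      simp only [List.foldl_cons]
      rw [step_comm seq ns i hi hns hin dB hne]
      exact ih (fun j hj => hl j (by simp [hj])) _ (step_ne seq ns i dB hne)

-- ===== VERDICT (by name: the statement is the Claim_ definition above) =====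
theorem ngram_next_map_spec : Claim_equal_ngram_next_map := by
  intro seq ns _ hpre
  unfold Spec_ngram_next_map ngram_next_map ngram_next_map_alt
  have hr : (seq.length : Int) + 1 - (ns + 1) = (seq.length : Int) - ns := by ring
  rw [hr]
  have hemp : pvMapD (PySem.Dict.mk ([] : List (List Int × List Int)))
      = (PySem.Dict.empty : PySem.Dict (List Int) (Option Int)) := rfl
  have hfold := fold_comm seq ns hpre (PySem.List.pyRange 0 ((seq.length : Int) - ns) 1)
      (fun i hi => by
        rw [PySem.List.mem_pyRange_one] at hi
        exact ⟨hi.1, by omega⟩)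
      (PySem.Dict.mk []) (by intro p hp; simp at hp)
  rw [hemp] at hfold
  rw [hfold]
  simp only [pvMapD, List.filterMap_map]
  apply List.filterMap_congr
  intro p _
  obtain ⟨k, g⟩ := p
  cases g with
  | nil => rfl
  | cons v0 vs =>
      simp only [Function.comp, pvCollapse, List.all_cons, BEq.rfl, Bool.true_and]
      by_cases h : vs.all (· == v0) = true <;> simp [h]
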